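-- pv_equiv track=rewrite | github.com/iluna91/testing_git | merge.py | adjust_line
-- ===== SOURCE A (Python) =====
-- def adjust_line(line):
--     """
--     Function that adjust the line to the left
--     """
--     _line_slide = [ 0 for _item in line]
--     _line_index = 0
--     for _item in range(len(line)):
--         if line[_item] != 0:
--             _line_slide[_line_index] = line[_item]
--             _line_index += 1
--     return _line_slide
-- ===== SOURCE B (Python) =====
-- def adjust_line(line):
--     """
--     Function that adjust the line to the left
--     """
--     # Stable sort: non-zeros (key False) keep their order before all zeros (key True).
--     return sorted(line, key=lambda x: x == 0)
-- ===== Notes on version B (the rewrite author's own statement) =====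
-- stated objective: alternative
-- what changed: A scatters non-zero elements into a preallocated zero array at a running write index; B instead performs a stable sort with the boolean key x == 0, so non-zeros keep their relative order before all zeros.
import Mathlib
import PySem

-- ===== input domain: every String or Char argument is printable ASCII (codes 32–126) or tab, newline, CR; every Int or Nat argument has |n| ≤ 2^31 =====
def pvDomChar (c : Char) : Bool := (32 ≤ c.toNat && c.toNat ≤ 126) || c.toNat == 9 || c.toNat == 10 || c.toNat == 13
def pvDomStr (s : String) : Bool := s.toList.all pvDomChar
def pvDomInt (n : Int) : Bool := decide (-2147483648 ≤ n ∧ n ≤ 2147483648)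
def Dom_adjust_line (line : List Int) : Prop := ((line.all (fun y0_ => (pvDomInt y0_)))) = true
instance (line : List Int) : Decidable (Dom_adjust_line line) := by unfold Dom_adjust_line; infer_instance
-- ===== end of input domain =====

-- B replaces A's scatter-into-preallocated-zero-array with a stable sort by the key "x == 0"
-- (non-zeros keep their order before all zeros). Alternative algorithm; no speed claim.

-- ===== PORT A =====
-- A: _line_slide = [0 for _ in line]; for i in range(len(line)): if line[i] != 0: _line_slide[idx] = line[i]; idx += 1
def adjust_line (line : List Int) : List Int :=
  let slide := line.map (fun _ => (0 : Int))
  let st := (PySem.List.pyRange 0 line.length 1).foldl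
    (fun (st : List Int × Int) i =>
      if PySem.List.pyGetD line i 0 ≠ 0 then
        (PySem.List.pySetD st.1 st.2 (PySem.List.pyGetD line i 0), st.2 + 1)
      else st)
    (slide, 0)
  st.1

-- ===== PORT B =====
-- B: sorted(line, key=lambda x: x == 0); the bool key False/True is ported as Int 0/1
-- (Python compares bools by their int values), stable sort = PySem.List.sorted.
def adjust_line_alt (line : List Int) : List Int :=
  PySem.List.sorted line (fun x => if x = 0 then (1 : Int) else 0) false

-- ===== PRECONDITION & SPEC =====
def Spec_adjust_line (line : List Int) (out : List Int) : Prop := out = adjust_line_alt line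
instance (line : List Int) (out : List Int) : Decidable (Spec_adjust_line line out) := by unfold Spec_adjust_line; infer_instance

-- ===== CLAIM (what is proved, stated in full; the proofs are below) =====
def Claim_equal_adjust_line : Prop := ∀ (line : List Int), Dom_adjust_line line → Spec_adjust_line line (adjust_line line)

-- ===== LEMMAS AND PROOFS =====

-- the comparison function of B's sort
def pvBefore (a b : Int) : Bool :=
  decide ((if a = 0 then (1 : Int) else 0) < (if b = 0 then (1 : Int) else 0))

-- ---- A-side: the scatter loop produces filter (≠ 0) ++ zero padding ----

-- setting position acc.length in acc ++ (0-padding of length m+1) appends the value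
lemma set_pad (acc : List Int) (m : Nat) (v : Int) :
    (acc ++ List.replicate (m + 1) 0).set acc.length v
      = (acc ++ [v]) ++ List.replicate m 0 := by
  induction acc with
  | nil => simp [List.replicate_succ]
  | cons a t ih => simp [ih]

-- the loop invariant: starting from a compacted prefix acc followed by m zeros,
-- folding the rest appends its non-zero elements and shrinks the padding accordingly
lemma loop_inv (rest : List Int) : ∀ (acc : List Int) (m : Nat),
    (rest.filter (fun x => x ≠ 0)).length ≤ m →
    rest.foldl
      (fun (st : List Int × Int) item =>
        if item ≠ 0 then (PySem.List.pySetD st.1 st.2 item, st.2 + 1) else st)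
      (acc ++ List.replicate m 0, (acc.length : Int))
    = (acc ++ rest.filter (fun x => x ≠ 0)
         ++ List.replicate (m - (rest.filter (fun x => x ≠ 0)).length) 0,
       ((acc.length + (rest.filter (fun x => x ≠ 0)).length : Nat) : Int)) := by
  induction rest with
  | nil => intro acc m h; simp
  | cons x t ih =>
    intro acc m h
    by_cases hx : x = 0
    · simp only [List.foldl_cons, hx]
      simpa using ih acc m (by simpa [hx] using h)
    · have hlen : (t.filter (fun x => x ≠ 0)).length + 1 ≤ m := by
        simpa [hx, List.filter_cons] using h
      obtain ⟨m', rfl⟩ : ∃ m', m = m' + 1 := ⟨m - 1, by omega⟩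
      simp only [List.foldl_cons, hx, if_pos, ne_eq, not_false_eq_true,
        PySem.List.pySetD_natCast, set_pad]
      have := ih (acc ++ [x]) m' (by omega)
      simp only [List.length_append, List.length_singleton] at this
      rw [show ((acc.length : Int) + 1) = ((acc.length + 1 : Nat) : Int) by push_cast; ring]
      rw [this]
      simp [hx]
      ring

lemma adjust_line_eq_filter_pad (line : List Int) :
    adjust_line line
      = line.filter (fun x => x ≠ 0)
          ++ List.replicate (line.length - (line.filter (fun x => x ≠ 0)).length) 0 := by
  unfold adjust_line
  dsimp only
  rw [PySem.List.foldl_pyRange_zero_pyGetD' line 0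
        (fun (st : List Int × Int) item =>
          if item ≠ 0 then (PySem.List.pySetD st.1 st.2 item, st.2 + 1) else st)]
  have := loop_inv line [] line.length (List.length_filter_le _ _)
  simp only [List.nil_append, List.length_nil, Nat.cast_zero] at this
  simp only [ne_eq, ite_not] at this ⊢
  rw [List.map_const']
  rw [this]

-- ---- B-side: the stable insertion sort produces the same filter ++ padding ----

-- inserting a zero (key 1) never goes before anything (keys are ≤ 1): it lands at the end
lemma insert_zero (l : List Int) :
    PySem.List.insertBy pvBefore 0 l = l ++ [0] := by
  induction l with
  | nil => rfl
  | cons y ys ih =>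
    have hb : pvBefore 0 y = false := by
      unfold pvBefore; by_cases hy : y = 0 <;> simp [hy]
    simp [PySem.List.insertBy, hb, ih]

-- inserting a non-zero (key 0) passes the non-zero prefix and stops at the first zero
lemma insert_nonzero (x : Int) (hx : x ≠ 0) (ks : List Int)
    (hks : ∀ y ∈ ks, y ≠ 0) (m : Nat) :
    PySem.List.insertBy pvBefore x (ks ++ List.replicate m 0)
      = ks ++ x :: List.replicate m 0 := by
  induction ks with
  | nil =>
    cases m with
    | zero => rfl
    | succ m' =>
      have hb : pvBefore x 0 = true := by unfold pvBefore; simp [hx]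
      simp [List.replicate_succ, PySem.List.insertBy, hb]
  | cons k kt ih =>
    have hk : k ≠ 0 := hks k (by simp)
    have hb : pvBefore x k = false := by unfold pvBefore; simp [hx, hk]
    simp only [List.cons_append, PySem.List.insertBy, hb]
    simp [ih (fun y hy => hks y (by simp [hy]))]

-- the sort's fold invariant: accumulator = non-zero prefix ++ zero padding
lemma sort_inv (l : List Int) : ∀ (ks : List Int) (m : Nat), (∀ y ∈ ks, y ≠ 0) →
    l.foldl (fun acc x => PySem.List.insertBy pvBefore x acc) (ks ++ List.replicate m 0)
      = (ks ++ l.filter (fun x => x ≠ 0))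
          ++ List.replicate (m + (l.filter (fun x => decide (x = 0))).length) 0 := by
  induction l with
  | nil => intro ks m _; simp
  | cons x t ih =>
    intro ks m hks
    by_cases hx : x = 0
    · have : PySem.List.insertBy pvBefore x (ks ++ List.replicate m 0)
          = ks ++ List.replicate (m + 1) 0 := by
        subst hx
        rw [insert_zero]
        simp [List.replicate_succ']
      simp only [List.foldl_cons, this]
      rw [ih ks (m + 1) hks]
      simp [hx]
      ring_nf
    · simp only [List.foldl_cons, insert_nonzero x hx ks hks m]
      have : ks ++ x :: List.replicate m 0 = (ks ++ [x]) ++ List.replicate m 0 := by simp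
      rw [this, ih (ks ++ [x]) m
        (by intro y hy; rcases List.mem_append.1 hy with h | h
            · exact hks y h
            · simpa using (by simpa using h) ▸ hx)]
      simp [hx]

-- the two paddings have the same length
lemma count_zero_eq (l : List Int) :
    (l.filter (fun x => decide (x = 0))).length
      = l.length - (l.filter (fun x => x ≠ 0)).length := by
  induction l with
  | nil => rfl
  | cons x t ih =>
    by_cases hx : x = 0 <;>
      simp [hx, ih, Nat.succ_sub (List.length_filter_le _ _)]

lemma adjust_line_alt_eq_filter_pad (line : List Int) :
    adjust_line_alt line
      = line.filter (fun x => x ≠ 0)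
          ++ List.replicate (line.length - (line.filter (fun x => x ≠ 0)).length) 0 := by
  unfold adjust_line_alt
  rw [PySem.List.sorted_eq_foldl_insertBy]
  have : (fun acc x => PySem.List.insertBy
      (fun a b => decide ((if a = 0 then (1:Int) else 0) < (if b = 0 then (1:Int) else 0))) x acc)
      = (fun acc x => PySem.List.insertBy pvBefore x acc) := by
    funext acc x; rfl
  rw [this]
  have h := sort_inv line [] 0 (by intro y hy; simp at hy)
  simp only [List.nil_append, Nat.zero_add, List.replicate_zero] at h
  rw [h, count_zero_eq]

-- ===== VERDICT (by name: the statement is the Claim_ definition above) =====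
theorem adjust_line_spec : Claim_equal_adjust_line := by
  intro line _
  show adjust_line line = adjust_line_alt line
  rw [adjust_line_eq_filter_pad, adjust_line_alt_eq_filter_pad]
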